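-- pv_equiv track=rewrite | github.com/drzachconner/website-cloning-toolkit | archive/scripts/extract-colors.py | merge_palettes
-- ===== SOURCE A (Python) =====
-- def merge_palettes(palettes):
--     """Merge multiple palette dicts, deduplicating colors by hex value.
--
--     Each palette has the same structure: {category: {type: [entries]}}.
--     Entries are deduplicated by hex value within each category+type.
--     """
--     merged = {}
--
--     color_keys = ["text_colors", "background_colors", "border_colors", "other_colors"]
--
--     for palette in palettes:
--         for category, data in palette.items():
--             if category not in merged:
--                 merged[category] = {k: [] for k in color_keys}
--
--             for key in color_keys:
--                 existing_hexes = {e["hex"] for e in merged[category].get(key, [])}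
--                 for entry in data.get(key, []):
--                     if entry["hex"] not in existing_hexes:
--                         merged[category][key].append(entry)
--                         existing_hexes.add(entry["hex"])
--
--     return merged
-- ===== SOURCE B (Python) =====
-- def merge_palettes(palettes):
--     """Merge multiple palette dicts, deduplicating colors by hex value.
--
--     Different decomposition: flatten to a (category, data) pair stream, list the
--     categories in first-seen order, then for each category+type gather all its
--     entries across the stream and deduplicate them by repeated head-filtering.
--     """
--     color_keys = ["text_colors", "background_colors", "border_colors", "other_colors"]
--
--     pairs = [(c, data) for palette in palettes for c, data in palette.items()]
--
--     categories = []
--     for c, _ in pairs: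
--         if c not in categories:
--             categories.append(c)
--
--     def dedup(entries):
--         out = []
--         rest = entries
--         while rest:
--             head = rest[0]
--             out.append(head)
--             rest = [e for e in rest[1:] if e["hex"] != head["hex"]]
--         return out
--
--     def gather(c, k):
--         return [e for cat, data in pairs if cat == c for e in data.get(k, [])]
--
--     return {c: {k: dedup(gather(c, k)) for k in color_keys} for c in categories}
-- ===== Notes on version B (the rewrite author's own statement) =====
-- stated objective: alternative
-- what changed: A makes one pass mutating a merged dict with a seen-set recomputed per palette/category/key; B instead flattens the palettes to a (category,data) pair stream, lists categories in first-seen order, and for each category+type gathers all its entries from the stream and deduplicates them by repeated head-filtering (emit the head, drop later entries with its hex) - staged passes with no mutable merged structure. B trades a single accumulating pass for per-category rescans of the stream and a quadratic-in-bucket-size dedup.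
import Mathlib
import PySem

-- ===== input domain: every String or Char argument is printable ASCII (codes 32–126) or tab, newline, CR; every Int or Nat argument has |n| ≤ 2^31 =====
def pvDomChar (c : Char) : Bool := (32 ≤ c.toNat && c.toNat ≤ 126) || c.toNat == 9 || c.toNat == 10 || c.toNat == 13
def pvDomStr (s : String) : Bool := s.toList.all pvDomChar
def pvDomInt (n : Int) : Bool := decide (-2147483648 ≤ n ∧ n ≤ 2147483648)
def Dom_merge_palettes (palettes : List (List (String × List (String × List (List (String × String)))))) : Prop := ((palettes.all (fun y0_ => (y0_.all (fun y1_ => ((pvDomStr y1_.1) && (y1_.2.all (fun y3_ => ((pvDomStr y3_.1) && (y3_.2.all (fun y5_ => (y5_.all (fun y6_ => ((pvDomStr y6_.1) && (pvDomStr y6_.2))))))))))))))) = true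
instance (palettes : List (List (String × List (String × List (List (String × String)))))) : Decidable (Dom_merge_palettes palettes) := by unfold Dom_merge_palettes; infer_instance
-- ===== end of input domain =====

-- B restructures A's single accumulating pass into staged passes (pair stream, first-seen
-- category list, per-category gather + head-filter dedup); objective: alternative.

-- ===== PORT A =====
def pvColorKeys : List String :=
  ["text_colors", "background_colors", "border_colors", "other_colors"]

-- entry["hex"]; under Pre_ the key is present, so the "" default is never used
def pvHex (e : List (String × String)) : String :=
  ((PySem.Dict.mk e).get? "hex").getD ""

def merge_palettes (palettes : List (List (String × List (String × List (List (String × String)))))) : List (String × List (String × List (List (String × String)))) :=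
  let merged : PySem.Dict String (PySem.Dict String (List (List (String × String)))) :=
    palettes.foldl (fun merged palette =>
      palette.foldl (fun merged cd =>
        let category := cd.1
        let data : PySem.Dict String (List (List (String × String))) := PySem.Dict.mk cd.2
        let merged :=
          if merged.contains category then merged
          else merged.insert category
            (PySem.Dict.mk (pvColorKeys.map (fun k => (k, ([] : List (List (String × String)))))))
        pvColorKeys.foldl (fun merged key =>
          let cur := merged.getD category PySem.Dict.empty
          let r :=
            (data.getD key []).foldl
              (fun (s : List (List (String × String)) × PySem.Set String) entry =>
                if s.2.contains (pvHex entry) then s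
                else (s.1 ++ [entry], s.2.add (pvHex entry)))
              (cur.getD key [], PySem.Set.ofList ((cur.getD key []).map pvHex))
          merged.insert category (cur.insert key r.1)) merged) merged)
      PySem.Dict.empty
  merged.items.map (fun cp => (cp.1, cp.2.items))

-- ===== PORT B =====
-- B's dedup loop: emit the head, drop later entries sharing its hex, repeat on the rest
def pvDedup : List (List (String × String)) → List (List (String × String))
  | [] => []
  | e :: t => e :: pvDedup (t.filter (fun x => !(pvHex x == pvHex e)))
  termination_by l => l.length
  decreasing_by simpa using le_trans (List.length_filter_le _ _) (Nat.le_of_eq (List.length_attach (l := t)))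

def merge_palettes_alt (palettes : List (List (String × List (String × List (List (String × String)))))) : List (String × List (String × List (List (String × String)))) :=
  let pairs := palettes.flatMap (fun palette => palette)
  let categories := pairs.foldl (fun cats cd => if cats.contains cd.1 then cats else cats ++ [cd.1]) []
  let gather := fun (c k : String) =>
    pairs.flatMap (fun cd => if cd.1 == c then (PySem.Dict.mk cd.2).getD k [] else [])
  categories.map (fun c => (c, pvColorKeys.map (fun k => (k, pvDedup (gather c k)))))

-- ===== PRECONDITION & SPEC =====
-- Pre_ excludes (a) inputs where an entry under one of the four color keys lacks a "hex"
-- key, on which A raises KeyError, and (b) association lists with duplicate keys at any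
-- dict level that A reads, which a Python dict cannot even represent (the assoc-list
-- encoding is ambiguous there).
def Pre_merge_palettes (palettes : List (List (String × List (String × List (List (String × String)))))) : Prop :=
  ∀ palette ∈ palettes,
    (palette.map Prod.fst).Nodup ∧
    ∀ cd ∈ palette,
      (cd.2.map Prod.fst).Nodup ∧
      ∀ kv ∈ cd.2, kv.1 ∈ pvColorKeys →
        ∀ e ∈ kv.2, (e.map Prod.fst).Nodup ∧ "hex" ∈ e.map Prod.fst

instance (palettes : List (List (String × List (String × List (List (String × String)))))) : Decidable (Pre_merge_palettes palettes) := by unfold Pre_merge_palettes; infer_instance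

def pvWitness_merge_palettes : (List (List (String × List (String × List (List (String × String)))))) :=
  [[("c1", [("text_colors", [[("hex", "#fff")], [("hex", "#fff")]])])],
   [("c1", [("text_colors", [[("hex", "#000")]]), ("other_colors", [])])]]

def Spec_merge_palettes (palettes : List (List (String × List (String × List (List (String × String)))))) (out : List (String × List (String × List (List (String × String))))) : Prop := out = merge_palettes_alt palettes
instance (palettes : List (List (String × List (String × List (List (String × String)))))) (out : List (String × List (String × List (List (String × String))))) : Decidable (Spec_merge_palettes palettes out) := by
  unfold Spec_merge_palettes
  letI i1 : DecidableEq (List (List (String × String))) := List.hasDecEq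
  letI i2 : DecidableEq (String × List (List (String × String))) := instDecidableEqProd
  letI i3 : DecidableEq (List (String × List (List (String × String)))) := List.hasDecEq
  letI i4 : DecidableEq (String × List (String × List (List (String × String)))) := instDecidableEqProd
  letI i5 : DecidableEq (List (String × List (String × List (List (String × String))))) := List.hasDecEq
  exact i5 _ _

-- ===== CLAIM (what is proved, stated in full; the proofs are below) =====
def Claim_equal_merge_palettes : Prop := ∀ (palettes : List (List (String × List (String × List (List (String × String)))))), Dom_merge_palettes palettes → Pre_merge_palettes palettes → Spec_merge_palettes palettes (merge_palettes palettes)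

-- ===== LEMMAS AND PROOFS =====

-- abbreviations for the proofs
abbrev pvData := List (String × List (List (String × String)))
abbrev pvPair := String × pvData
abbrev pvInner := PySem.Dict String (List (List (String × String)))
abbrev pvOuter := PySem.Dict String pvInner

-- A's per-(category,data) step, extracted
def pvAStep (merged : pvOuter) (cd : pvPair) : pvOuter :=
  let category := cd.1
  let data : PySem.Dict String (List (List (String × String))) := PySem.Dict.mk cd.2
  let merged :=
    if merged.contains category then merged
    else merged.insert category
      (PySem.Dict.mk (pvColorKeys.map (fun k => (k, ([] : List (List (String × String)))))))
  pvColorKeys.foldl (fun merged key =>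
    let cur := merged.getD category PySem.Dict.empty
    let r :=
      (data.getD key []).foldl
        (fun (s : List (List (String × String)) × PySem.Set String) entry =>
          if s.2.contains (pvHex entry) then s
          else (s.1 ++ [entry], s.2.add (pvHex entry)))
        (cur.getD key [], PySem.Set.ofList ((cur.getD key []).map pvHex))
    merged.insert category (cur.insert key r.1)) merged

-- categories in first-seen order of a pair stream
def pvCats (s : List pvPair) : List String :=
  s.foldl (fun cats cd => if cats.contains cd.1 then cats else cats ++ [cd.1]) []

def pvGather (s : List pvPair) (c k : String) : List (List (String × String)) :=
  s.flatMap (fun cd => if cd.1 == c then (PySem.Dict.mk cd.2).getD k [] else [])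

def pvModelInner (s : List pvPair) (c : String) : pvInner :=
  PySem.Dict.mk (pvColorKeys.map (fun k => (k, pvDedup (pvGather s c k))))

def pvModel (s : List pvPair) : pvOuter :=
  PySem.Dict.mk ((pvCats s).map (fun c => (c, pvModelInner s c)))

theorem pvCats_eq_set (s : List pvPair) :
    pvCats s = PySem.Set.ofList (s.map Prod.fst) := by
  rw [PySem.Set.ofList_eq_foldl, List.foldl_map]
  rfl

theorem pvCats_nodup (s : List pvPair) : (pvCats s).Nodup := by
  rw [pvCats_eq_set]; exact PySem.Set.nodup_ofList _

theorem pvMem_cats (s : List pvPair) (c : String) :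
    c ∈ pvCats s ↔ c ∈ s.map Prod.fst := by
  rw [pvCats_eq_set]; simp [PySem.Set.mem_ofList]

theorem pvCats_append_singleton (s : List pvPair) (cd : pvPair) :
    pvCats (s ++ [cd]) = if cd.1 ∈ pvCats s then pvCats s else pvCats s ++ [cd.1] := by
  show List.foldl _ _ (s ++ [cd]) = _
  rw [List.foldl_append]
  simp [pvCats]

theorem pvGather_append_singleton (s : List pvPair) (cd : pvPair) (c k : String) :
    pvGather (s ++ [cd]) c k
      = pvGather s c k ++ (if cd.1 == c then (PySem.Dict.mk cd.2).getD k [] else []) := by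
  simp [pvGather]

theorem pvGather_of_not_mem (s : List pvPair) (c k : String) (h : c ∉ s.map Prod.fst) :
    pvGather s c k = [] := by
  simp only [pvGather, List.flatMap_eq_nil_iff]
  intro cd hcd
  have hne : (cd.1 == c) = false := by
    rw [beq_eq_false_iff_ne]
    rintro rfl
    exact h (List.mem_map_of_mem hcd)
  simp [hne]

-- pvDedup facts
theorem pvDedup_nil : pvDedup [] = [] := by rw [pvDedup]

theorem pvDedup_cons (e : List (String × String)) (t : List (List (String × String))) :
    pvDedup (e :: t) = e :: pvDedup (t.filter (fun x => !(pvHex x == pvHex e))) := by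
  rw [pvDedup]

theorem pvMem_hexes_filter (t : List (List (String × String))) (e : List (String × String))
    (h : String) (hne : h ≠ pvHex e) :
    h ∈ (t.filter (fun x => !(pvHex x == pvHex e))).map pvHex ↔ h ∈ t.map pvHex := by
  simp only [List.mem_map, List.mem_filter]
  constructor
  · rintro ⟨x, ⟨hx, -⟩, rfl⟩
    exact ⟨x, hx, rfl⟩
  · rintro ⟨x, hx, rfl⟩
    exact ⟨x, ⟨hx, by simpa using hne⟩, rfl⟩

theorem pvDedup_append_singleton (xs : List (List (String × String))) (y : List (String × String)) :
    pvDedup (xs ++ [y])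
      = if pvHex y ∈ xs.map pvHex then pvDedup xs else pvDedup xs ++ [y] := by
  induction xs using pvDedup.induct with
  | case1 => simp [pvDedup_nil, pvDedup_cons]
  | case2 e t ih =>
    simp only [List.unattach_filter, List.unattach_attach] at ih
    rw [List.cons_append, pvDedup_cons, List.filter_append]
    by_cases hy : pvHex y = pvHex e
    · rw [show List.filter (fun x => !(pvHex x == pvHex e)) [y] = [] by simp [hy],
        List.append_nil, ← pvDedup_cons, if_pos (by simp [hy])]
    · rw [show List.filter (fun x => !(pvHex x == pvHex e)) [y] = [y] by simp [hy],
        ih]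
      simp only [pvMem_hexes_filter t e _ hy]
      by_cases h2 : pvHex y ∈ t.map pvHex
      · rw [if_pos h2, if_pos (by simp [h2]), pvDedup_cons]
      · rw [if_neg h2, if_neg (by simp [hy, h2]), pvDedup_cons, List.cons_append]

theorem pvMem_hexes_dedup (xs : List (List (String × String))) (h : String) :
    h ∈ (pvDedup xs).map pvHex ↔ h ∈ xs.map pvHex := by
  induction xs using pvDedup.induct with
  | case1 => rw [pvDedup_nil]
  | case2 e t ih =>
    simp only [List.unattach_filter, List.unattach_attach] at ih
    rw [pvDedup_cons]
    by_cases he : h = pvHex e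
    · simp [he]
    · simp only [List.map_cons, List.mem_cons, ih]
      rw [pvMem_hexes_filter t e h he]

-- A's entry fold computes pvDedup of the concatenation
theorem pvEntryFold (ys xs : List (List (String × String))) (S : PySem.Set String)
    (hS : ∀ h, S.contains h = true ↔ h ∈ xs.map pvHex) :
    (ys.foldl
        (fun (s : List (List (String × String)) × PySem.Set String) entry =>
          if s.2.contains (pvHex entry) then s
          else (s.1 ++ [entry], s.2.add (pvHex entry)))
        (pvDedup xs, S)).1 = pvDedup (xs ++ ys) := by
  induction ys generalizing xs S with
  | nil => simp
  | cons y ys ih =>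
    rw [List.foldl_cons]
    by_cases hc : pvHex y ∈ xs.map pvHex
    · rw [if_pos ((hS _).mpr hc)]
      have h1 : pvDedup (xs ++ [y]) = pvDedup xs := by
        rw [pvDedup_append_singleton, if_pos hc]
      have hS' : ∀ h, S.contains h = true ↔ h ∈ (xs ++ [y]).map pvHex := by
        intro h
        rw [hS h]
        simp only [List.map_append, List.map_cons, List.map_nil, List.mem_append,
          List.mem_singleton]
        constructor
        · exact Or.inl
        · rintro (hh | rfl)
          · exact hh
          · exact hc
      have h2 := ih (xs ++ [y]) S hS'
      rw [h1] at h2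
      rw [h2, List.append_assoc]
      rfl
    · have hcF : S.contains (pvHex y) = false := by
        rw [Bool.eq_false_iff]
        intro hh
        exact hc ((hS _).mp hh)
      rw [if_neg (by rw [hcF]; exact Bool.false_ne_true)]
      have h1 : pvDedup xs ++ [y] = pvDedup (xs ++ [y]) := by
        rw [pvDedup_append_singleton, if_neg hc]
      have hS' : ∀ h, (S.add (pvHex y)).contains h = true ↔ h ∈ (xs ++ [y]).map pvHex := by
        intro h
        rw [PySem.Set.contains_iff, PySem.Set.mem_add, ← PySem.Set.contains_iff, hS h]
        simp [List.mem_append, eq_comm]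
      rw [h1]
      exact (ih (xs ++ [y]) _ hS').trans (by rw [List.append_assoc]; rfl)

-- dict-shape helpers
theorem pvContains_mk_map {ν : Type} (keys : List String) (v : String → ν) (c : String) :
    (PySem.Dict.mk (keys.map (fun k => (k, v k)))).contains c = keys.contains c := by
  rw [PySem.Dict.contains_mk, List.any_map]
  rw [Bool.eq_iff_iff]
  simp [Function.comp_def]

theorem pvGetD_mk_map {ν : Type} (keys : List String) (v : String → ν) (k : String) (d0 : ν)
    (hk : k ∈ keys) (hnd : keys.Nodup) :
    (PySem.Dict.mk (keys.map (fun j => (j, v j)))).getD k d0 = v k := by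
  have hmem : (k, v k) ∈ keys.map (fun j => (j, v j)) := List.mem_map_of_mem hk
  refine PySem.Dict.getD_of_mem_items _ hmem ?_ d0
  rw [PySem.Dict.keys_mk, List.map_map]
  simpa [Function.comp_def] using hnd

theorem pvContains_model (s : List pvPair) (c : String) :
    (pvModel s).contains c = (pvCats s).contains c :=
  pvContains_mk_map (pvCats s) (pvModelInner s) c

theorem pvGetD_model (s : List pvPair) (c : String) (h : c ∈ pvCats s) :
    (pvModel s).getD c PySem.Dict.empty = pvModelInner s c :=
  pvGetD_mk_map (pvCats s) (pvModelInner s) c PySem.Dict.empty h (pvCats_nodup s)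

theorem pvModelInner_append_of_ne (s : List pvPair) (cd : pvPair) (c' : String)
    (h : cd.1 ≠ c') : pvModelInner (s ++ [cd]) c' = pvModelInner s c' := by
  unfold pvModelInner
  congr 1
  apply List.map_congr_left
  intro k _
  rw [pvGather_append_singleton, show (cd.1 == c') = false from beq_eq_false_iff_ne.mpr h]
  simp

-- commuting a fold that rewrites one outer slot past the outer insert
theorem pvInnerFold (g : String → List (List (String × String)) → List (List (String × String)))
    (c : String) (keys : List String) (key : String) (M : pvOuter) :
    (key :: keys).foldl (fun m k =>
      m.insert c ((m.getD c PySem.Dict.empty).insert k (g k ((m.getD c PySem.Dict.empty).getD k [])))) M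
    = M.insert c ((key :: keys).foldl (fun d k => d.insert k (g k (d.getD k [])))
        (M.getD c PySem.Dict.empty)) := by
  induction keys generalizing key M with
  | nil => rfl
  | cons key2 keys ih =>
    rw [List.foldl_cons, ih key2, PySem.Dict.getD_insert_self, PySem.Dict.insert_insert_self]
    simp only [List.foldl_cons]

-- evaluating an update fold over the four literal color keys
theorem pvDFold (g : String → List (List (String × String)) → List (List (String × String)))
    (v : String → List (List (String × String))) :
    pvColorKeys.foldl (fun d k => d.insert k (g k (d.getD k [])))
      (PySem.Dict.mk (pvColorKeys.map (fun k => (k, v k))))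
    = PySem.Dict.mk (pvColorKeys.map (fun k => (k, g k (v k)))) := by
  apply PySem.Dict.ext
  simp [pvColorKeys, PySem.Dict.insert, PySem.Dict.contains, PySem.Dict.getD, PySem.Dict.get?]

-- the main simulation step
theorem pvAStep_model (s : List pvPair) (cd : pvPair) :
    pvAStep (pvModel s) cd = pvModel (s ++ [cd]) := by
  obtain ⟨c, dl⟩ := cd
  have hset : ∀ (xs : List (List (String × String))) (h : String),
      (PySem.Set.ofList ((pvDedup xs).map pvHex)).contains h = true ↔ h ∈ xs.map pvHex := by
    intro xs h
    rw [PySem.Set.contains_iff, PySem.Set.mem_ofList]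
    exact pvMem_hexes_dedup xs h
  have hbucket : ∀ (xs : List (List (String × String))) (k : String),
      ((((PySem.Dict.mk dl).getD k []).foldl
        (fun (st : List (List (String × String)) × PySem.Set String) entry =>
          if st.2.contains (pvHex entry) then st
          else (st.1 ++ [entry], st.2.add (pvHex entry)))
        (pvDedup xs, PySem.Set.ofList ((pvDedup xs).map pvHex))).1)
      = pvDedup (xs ++ (PySem.Dict.mk dl).getD k []) :=
    fun xs k => pvEntryFold _ xs _ (hset xs)
  by_cases hm : c ∈ pvCats s
  · have hcont : (pvModel s).contains c = true := by
      rw [pvContains_model]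
      exact List.elem_eq_true_of_mem hm
    simp only [pvAStep, hcont, if_true]
    have hinner := pvInnerFold
      (fun key xs => ((PySem.Dict.mk dl).getD key []).foldl
          (fun st entry => if st.2.contains (pvHex entry) = true then st
            else (st.1 ++ [entry], st.2.add (pvHex entry)))
          (xs, PySem.Set.ofList (xs.map pvHex)) |>.1)
      c ["background_colors", "border_colors", "other_colors"] "text_colors" (pvModel s)
    beta_reduce at hinner
    rw [show pvColorKeys = "text_colors" :: ["background_colors", "border_colors", "other_colors"] from rfl,
      hinner, pvGetD_model s c hm]
    have hd := pvDFold
      (fun key xs => ((PySem.Dict.mk dl).getD key []).foldl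
          (fun st entry => if st.2.contains (pvHex entry) = true then st
            else (st.1 ++ [entry], st.2.add (pvHex entry)))
          (xs, PySem.Set.ofList (xs.map pvHex)) |>.1)
      (fun k => pvDedup (pvGather s c k))
    beta_reduce at hd
    rw [show pvModelInner s c
        = PySem.Dict.mk (pvColorKeys.map (fun k => (k, pvDedup (pvGather s c k)))) from rfl,
      show ("text_colors" :: ["background_colors", "border_colors", "other_colors"]) = pvColorKeys from rfl]
    refine Eq.trans (congrArg (PySem.Dict.insert (pvModel s) c) hd) ?_
    simp only [hbucket]
    apply PySem.Dict.ext
    rw [PySem.Dict.items_insert_of_contains _ _ hcont]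
    simp only [pvModel]
    rw [pvCats_append_singleton, if_pos hm, List.map_map]
    apply List.map_congr_left
    intro c' hc'
    by_cases hcc : c' = c
    · subst hcc
      simp only [Function.comp_apply, beq_self_eq_true, if_true]
      refine congrArg (fun I => (c', I)) (congrArg PySem.Dict.mk (List.map_congr_left ?_))
      intro k _
      rw [pvGather_append_singleton]
      simp
    · have hne : (c' == c) = false := beq_eq_false_iff_ne.mpr hcc
      simp only [Function.comp_apply, hne, Bool.false_eq_true, if_false]
      rw [pvModelInner_append_of_ne s (c, dl) c' (fun h => hcc h.symm)]
  · have hcont : (pvModel s).contains c = false := by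
      rw [pvContains_model, ← Bool.not_eq_true]
      intro hh
      exact hm (List.mem_of_elem_eq_true hh)
    simp only [pvAStep, hcont, Bool.false_eq_true, if_false]
    have hgather0 : ∀ k, pvGather s c k = [] := by
      intro k
      exact pvGather_of_not_mem s c k (fun hh => hm ((pvMem_cats s c).mpr hh))
    have hbucket0 : ∀ (k : String),
        ((((PySem.Dict.mk dl).getD k []).foldl
          (fun (st : List (List (String × String)) × PySem.Set String) entry =>
            if st.2.contains (pvHex entry) then st
            else (st.1 ++ [entry], st.2.add (pvHex entry)))
          (([] : List (List (String × String))),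
            PySem.Set.ofList (List.map pvHex ([] : List (List (String × String)))))).1)
        = pvDedup ((PySem.Dict.mk dl).getD k []) := by
      intro k
      have h := hbucket [] k
      rw [pvDedup_nil] at h
      simpa using h
    rw [show pvColorKeys = "text_colors" :: ["background_colors", "border_colors", "other_colors"] from rfl]
    have hinner := pvInnerFold
      (fun key xs => ((PySem.Dict.mk dl).getD key []).foldl
          (fun st entry => if st.2.contains (pvHex entry) = true then st
            else (st.1 ++ [entry], st.2.add (pvHex entry)))
          (xs, PySem.Set.ofList (xs.map pvHex)) |>.1)
      c ["background_colors", "border_colors", "other_colors"] "text_colors"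
      ((pvModel s).insert c
        (PySem.Dict.mk (("text_colors" :: ["background_colors", "border_colors", "other_colors"]).map
          (fun k => (k, ([] : List (List (String × String))))))))
    beta_reduce at hinner
    rw [hinner, PySem.Dict.getD_insert_self, PySem.Dict.insert_insert_self,
      show ("text_colors" :: ["background_colors", "border_colors", "other_colors"]) = pvColorKeys from rfl]
    have hd := pvDFold
      (fun key xs => ((PySem.Dict.mk dl).getD key []).foldl
          (fun st entry => if st.2.contains (pvHex entry) = true then st
            else (st.1 ++ [entry], st.2.add (pvHex entry)))
          (xs, PySem.Set.ofList (xs.map pvHex)) |>.1)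
      (fun _ => ([] : List (List (String × String))))
    beta_reduce at hd
    refine Eq.trans (congrArg (PySem.Dict.insert (pvModel s) c) hd) ?_
    simp only [hbucket0]
    apply PySem.Dict.ext
    rw [PySem.Dict.items_insert_of_not_contains _ _ hcont]
    simp only [pvModel]
    rw [pvCats_append_singleton, if_neg hm, List.map_append]
    congr 1
    · apply List.map_congr_left
      intro c' hc'
      rw [pvModelInner_append_of_ne s (c, dl) c' (by
        intro h
        apply hm
        have hcc : c = c' := h
        rw [hcc]
        exact hc')]
    · simp only [List.map_cons, List.map_nil]
      refine congrArg (fun I => [(c, I)]) (congrArg PySem.Dict.mk (List.map_congr_left ?_))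
      intro k _
      rw [pvGather_append_singleton, hgather0 k]
      simp

theorem pvFold_model (s : List pvPair) :
    s.foldl pvAStep PySem.Dict.empty = pvModel s := by
  induction s using List.reverseRecOn with
  | nil => rfl
  | append_singleton s cd ih => rw [List.foldl_append, List.foldl_cons, List.foldl_nil, ih, pvAStep_model]

theorem pv_main (palettes : List (List (String × List (String × List (List (String × String)))))) :
    merge_palettes palettes = merge_palettes_alt palettes := by
  have hA : merge_palettes palettes
      = ((palettes.flatten).foldl pvAStep PySem.Dict.empty).items.map
          (fun cp => (cp.1, cp.2.items)) := by
    conv_rhs => rw [List.foldl_flatten]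
    rfl
  have hB : merge_palettes_alt palettes
      = (pvCats palettes.flatten).map (fun c =>
          (c, pvColorKeys.map (fun k => (k, pvDedup (pvGather palettes.flatten c k))))) := by
    simp only [merge_palettes_alt]
    rw [show palettes.flatMap (fun palette => palette) = palettes.flatten from by simp]
    rfl
  rw [hA, hB, pvFold_model]
  show ((pvCats palettes.flatten).map
      (fun c => (c, pvModelInner palettes.flatten c))).map (fun cp => (cp.1, cp.2.items)) = _
  rw [List.map_map]
  rfl

-- ===== VERDICT (by name: the statement is the Claim_ definition above) =====
theorem merge_palettes_spec : Claim_equal_merge_palettes := by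
  intro palettes _ _
  unfold Spec_merge_palettes
  exact pv_main palettes
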